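-- pv_equiv track=rewrite | github.com/jiajunma/unirepn | combunipotent/drc.py | S_Wrepn_BC
-- ===== SOURCE A (Python) =====
-- def S_Wrepn_BC(part):
--     """
--     From special orbit to special representations of the Weyl group of
--     type B and type C
--     Not check the specialness of the partition
--     """
--     part     = [x for x in part if x!=0]
--     a, res   = divmod(len(part),2)
--     if res == 0:
--         part = part+[0]
--     part.sort()
--     tauL = [(part[2*i-1]+1)//2 for i in range(1,a+1)]
--     tauR = [part[2*i]//2 for i in range(a+1)]
--     return (tauL,tauR)
-- ===== SOURCE B (Python) =====
-- def S_Wrepn_BC(part):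
--     vals = [x for x in part if x != 0]
--     if len(vals) % 2 == 0:
--         vals.append(0)
--     vals.sort()
--     it = iter(vals)
--     tauL = []
--     tauR = [next(it) // 2]
--     # consume the remaining (left, right) pairs in one pass
--     for left in it:
--         tauL.append((left + 1) // 2)
--         tauR.append(next(it) // 2)
--     return (tauL, tauR)
-- ===== Notes on version B (the rewrite author's own statement) =====
-- stated objective: alternative
-- what changed: A extracts tauL/tauR with two separate index-formula comprehensions (part[2*i-1], part[2*i]) over ranges; B takes the sorted list head and then consumes the tail in a single pairwise pass, building both lists together with no index arithmetic.
import Mathlib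
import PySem

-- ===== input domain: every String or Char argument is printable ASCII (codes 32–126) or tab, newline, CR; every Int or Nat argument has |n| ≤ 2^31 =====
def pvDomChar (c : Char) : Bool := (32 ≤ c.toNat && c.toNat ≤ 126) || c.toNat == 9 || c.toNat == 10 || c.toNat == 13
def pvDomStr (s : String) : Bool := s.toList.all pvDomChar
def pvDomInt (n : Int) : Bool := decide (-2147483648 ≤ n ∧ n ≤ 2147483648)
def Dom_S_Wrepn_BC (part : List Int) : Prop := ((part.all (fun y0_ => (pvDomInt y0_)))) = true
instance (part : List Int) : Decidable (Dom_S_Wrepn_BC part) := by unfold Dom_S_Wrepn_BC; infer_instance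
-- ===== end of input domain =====

-- B replaces A's two index-formula comprehensions by a single pairwise pass over the sorted list
-- (no index arithmetic); same preamble (drop zeros, pad to odd length, sort); similar cost.

-- ===== PORT A =====
-- Indices 2*i-1 and 2*i always lie inside s (s has length 2*a+1), so pyGetD's default 0 is never used.
def S_Wrepn_BC (part : List Int) : List Int × List Int :=
  let part1 := part.filter (fun x => x != 0)
  let a := PySem.Int.floordiv (part1.length : Int) 2
  let res := PySem.Int.mod (part1.length : Int) 2
  let part2 := if res = 0 then part1 ++ [0] else part1
  let s := PySem.List.sorted part2 (fun x => x)
  let tauL := (PySem.List.pyRange 1 (a + 1) 1).map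
    (fun i => PySem.Int.floordiv (PySem.List.pyGetD s (2 * i - 1) 0 + 1) 2)
  let tauR := (PySem.List.pyRange 0 (a + 1) 1).map
    (fun i => PySem.Int.floordiv (PySem.List.pyGetD s (2 * i) 0) 2)
  (tauL, tauR)

-- ===== PORT B =====
-- Source B's pairwise pass: the iterator loop consumes one (left, right) pair per step; rendered as the
-- obvious structural recursion on the remaining list. The one-element case is unreachable (the tail
-- after the head has even length).
def pvSplit : List Int → List Int × List Int
  | x :: y :: rest =>
    let p := pvSplit rest
    (PySem.Int.floordiv (x + 1) 2 :: p.1, PySem.Int.floordiv y 2 :: p.2)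
  | _ => ([], [])

-- The [] branch is unreachable (Source B's first next(it)): vals is never empty, since a 0 is appended
-- when the filtered list has even length.
def S_Wrepn_BC_alt (part : List Int) : List Int × List Int :=
  let vals0 := part.filter (fun x => x != 0)
  let vals1 := if vals0.length % 2 = 0 then vals0 ++ [0] else vals0
  let vals := PySem.List.sorted vals1 (fun x => x)
  match vals with
  | [] => ([], [])
  | h :: t =>
    let p := pvSplit t
    (p.1, PySem.Int.floordiv h 2 :: p.2)

-- ===== PRECONDITION & SPEC =====
def Spec_S_Wrepn_BC (part : List Int) (out : List Int × List Int) : Prop := out = S_Wrepn_BC_alt part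
instance (part : List Int) (out : List Int × List Int) : Decidable (Spec_S_Wrepn_BC part out) := by unfold Spec_S_Wrepn_BC; infer_instance

-- ===== CLAIM (what is proved, stated in full; the proofs are below) =====
def Claim_equal_S_Wrepn_BC : Prop := ∀ (part : List Int), Dom_S_Wrepn_BC part → Spec_S_Wrepn_BC part (S_Wrepn_BC part)

-- ===== LEMMAS AND PROOFS =====

-- A's two comprehensions, re-indexed over List.range, equal B's pairwise recursion,
-- for any list of odd length 2*k+1.
lemma pv_core : ∀ (k : Nat) (s : List Int), s.length = 2 * k + 1 →
    (((List.range k).map (fun j => PySem.Int.floordiv (s.getD (2 * j + 1) 0 + 1) 2),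
      (List.range (k + 1)).map (fun j => PySem.Int.floordiv (s.getD (2 * j) 0) 2))
      : List Int × List Int)
    = (match s with
       | [] => ([], [])
       | h :: t => ((pvSplit t).1, PySem.Int.floordiv h 2 :: (pvSplit t).2)) := by
  intro k
  induction k with
  | zero =>
    intro s hs
    match s, hs with
    | [h], _ => simp [pvSplit]
  | succ k ih =>
    intro s hs
    match s, hs with
    | h :: x :: s₂, hs =>
      have hlen : s₂.length = 2 * k + 1 := by simp [List.length_cons] at hs; omega
      have hIH := ih s₂ hlen
      match s₂, hlen, hIH with
      | y :: r, hlen, hIH =>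
        have hIH1 := congrArg Prod.fst hIH
        have hIH2 := congrArg Prod.snd hIH
        simp only [] at hIH1 hIH2
        have hL : (List.range (k + 1)).map
              (fun j => PySem.Int.floordiv ((h :: x :: y :: r).getD (2 * j + 1) 0 + 1) 2)
            = PySem.Int.floordiv (x + 1) 2 ::
              (List.range k).map (fun j => PySem.Int.floordiv ((y :: r).getD (2 * j + 1) 0 + 1) 2) := by
          rw [List.range_succ_eq_map, List.map_cons, List.map_map]
          refine congrArg₂ _ (by simp) (List.map_congr_left ?_)
          intro j _
          show PySem.Int.floordiv ((h :: x :: y :: r).getD (2 * Nat.succ j + 1) 0 + 1) 2 = _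
          have h3 : 2 * Nat.succ j + 1 = 2 * j + 1 + 1 + 1 := by omega
          rw [h3, List.getD_cons_succ, List.getD_cons_succ]
        have hR : (List.range (k + 1 + 1)).map
              (fun j => PySem.Int.floordiv ((h :: x :: y :: r).getD (2 * j) 0) 2)
            = PySem.Int.floordiv h 2 ::
              (List.range (k + 1)).map (fun j => PySem.Int.floordiv ((y :: r).getD (2 * j) 0) 2) := by
          rw [List.range_succ_eq_map, List.map_cons, List.map_map]
          refine congrArg₂ _ (by simp) (List.map_congr_left ?_)
          intro j _
          show PySem.Int.floordiv ((h :: x :: y :: r).getD (2 * Nat.succ j) 0) 2 = _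
          have h3 : 2 * Nat.succ j = 2 * j + 1 + 1 := by omega
          rw [h3, List.getD_cons_succ, List.getD_cons_succ]
        rw [hL, hR, hIH1, hIH2]
        simp [pvSplit]

-- bridge: A's pyRange/pyGetD comprehensions over Int indices to List.range/getD over Nat indices
lemma pv_bridgeL (k : Nat) (s : List Int) :
    (PySem.List.pyRange 1 ((k : Int) + 1) 1).map
      (fun i => PySem.Int.floordiv (PySem.List.pyGetD s (2 * i - 1) 0 + 1) 2)
    = (List.range k).map (fun j => PySem.Int.floordiv (s.getD (2 * j + 1) 0 + 1) 2) := by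
  rw [PySem.List.pyRange_one]
  have h1 : ((k : Int) + 1 - 1).toNat = k := by omega
  rw [h1, List.map_map]
  refine List.map_congr_left ?_
  intro j _
  have h2 : (2 * (1 + (j : Int)) - 1) = ((2 * j + 1 : Nat) : Int) := by push_cast; ring
  simp only [Function.comp, h2, PySem.List.pyGetD_natCast]

lemma pv_bridgeR (k : Nat) (s : List Int) :
    (PySem.List.pyRange 0 ((k : Int) + 1) 1).map
      (fun i => PySem.Int.floordiv (PySem.List.pyGetD s (2 * i) 0) 2)
    = (List.range (k + 1)).map (fun j => PySem.Int.floordiv (s.getD (2 * j) 0) 2) := by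
  rw [PySem.List.pyRange_one]
  have h1 : ((k : Int) + 1 - 0).toNat = k + 1 := by omega
  rw [h1, List.map_map]
  refine List.map_congr_left ?_
  intro j _
  have h2 : (2 * (0 + (j : Int))) = ((2 * j : Nat) : Int) := by push_cast; ring
  simp only [Function.comp, h2, PySem.List.pyGetD_natCast]

-- ===== VERDICT (by name: the statement is the Claim_ definition above) =====
theorem S_Wrepn_BC_spec : Claim_equal_S_Wrepn_BC := by
  intro part _
  show S_Wrepn_BC part = S_Wrepn_BC_alt part
  simp only [S_Wrepn_BC, S_Wrepn_BC_alt]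
  generalize hpart1 : part.filter (fun x => x != 0) = part1
  generalize hn : part1.length = n
  have hres : PySem.Int.mod (n : Int) 2 = ((n % 2 : Nat) : Int) := by
    exact_mod_cast PySem.Int.mod_natCast n 2
  have ha : PySem.Int.floordiv (n : Int) 2 = ((n / 2 : Nat) : Int) := by
    exact_mod_cast PySem.Int.floordiv_natCast n 2
  have hcond : (PySem.Int.mod (n : Int) 2 = 0) ↔ (n % 2 = 0) := by
    rw [hres]; exact_mod_cast Int.natCast_eq_zero
  have hpart2 : (if PySem.Int.mod (n : Int) 2 = 0 then part1 ++ [0] else part1)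
      = (if n % 2 = 0 then part1 ++ [0] else part1) := by
    by_cases h : n % 2 = 0
    · rw [if_pos (hcond.mpr h), if_pos h]
    · rw [if_neg (fun hc => h (hcond.mp hc)), if_neg h]
  rw [hpart2, ha]
  set part2 := if n % 2 = 0 then part1 ++ [0] else part1 with hp2
  have hlen2 : part2.length = 2 * (n / 2) + 1 := by
    rw [hp2]
    by_cases h : n % 2 = 0
    · rw [if_pos h]; simp [hn]; omega
    · rw [if_neg h]; rw [hn]; omega
  set s := PySem.List.sorted part2 (fun x => x) with hs
  have hslen : s.length = 2 * (n / 2) + 1 := by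
    rw [hs, PySem.List.length_sorted]; exact hlen2
  rw [pv_bridgeL (n / 2) s, pv_bridgeR (n / 2) s]
  exact pv_core (n / 2) s hslen
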